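-- pv_equiv track=rewrite | github.com/Samsara-GOG/python-divers | swinnen/7-16_remplaceChrIndexDebutFin.py | changeCar
-- ===== SOURCE A (Python) =====
-- def changeCar(ch, ca1, ca2, debut =0, fin =-1):
--     "Remplace tous les caractères ca1 par des caractères ca2 dans la chaîne ch"
--     if fin == -1:
--         fin = len(ch)
--     nch, i = "", 0 # nouvelle chaîne string
--     while i < len(ch):
--         if i >= debut and i <= fin and ch[i] == ca1:
--             nch += ca2
--         else:
--             nch += ch[i]
--         i += 1
--     return nch
-- ===== SOURCE B (Python) =====
-- def changeCar(ch, ca1, ca2, debut=0, fin=-1):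
--     "Remplace tous les caractères ca1 par des caractères ca2 dans la chaîne ch"
--     # Only a single character can ever match, since matching is per-character.
--     hi = len(ch) - 1 if fin == -1 else min(fin, len(ch) - 1)
--     lo = max(debut, 0)
--     if len(ca1) != 1 or lo > hi:
--         return ch
--     return ch[:lo] + ch[lo:hi + 1].replace(ca1, ca2) + ch[hi + 1:]
-- ===== Notes on version B (the rewrite author's own statement) =====
-- stated objective: idiomatic
-- what changed: Replaces A's per-character while loop with string accumulation by computing the effective window [max(debut,0), min(fin,len-1)] once and returning prefix + str.replace on the in-range slice + suffix (unchanged input returned directly when ca1 is not a single character or the window is empty).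
import Mathlib
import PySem

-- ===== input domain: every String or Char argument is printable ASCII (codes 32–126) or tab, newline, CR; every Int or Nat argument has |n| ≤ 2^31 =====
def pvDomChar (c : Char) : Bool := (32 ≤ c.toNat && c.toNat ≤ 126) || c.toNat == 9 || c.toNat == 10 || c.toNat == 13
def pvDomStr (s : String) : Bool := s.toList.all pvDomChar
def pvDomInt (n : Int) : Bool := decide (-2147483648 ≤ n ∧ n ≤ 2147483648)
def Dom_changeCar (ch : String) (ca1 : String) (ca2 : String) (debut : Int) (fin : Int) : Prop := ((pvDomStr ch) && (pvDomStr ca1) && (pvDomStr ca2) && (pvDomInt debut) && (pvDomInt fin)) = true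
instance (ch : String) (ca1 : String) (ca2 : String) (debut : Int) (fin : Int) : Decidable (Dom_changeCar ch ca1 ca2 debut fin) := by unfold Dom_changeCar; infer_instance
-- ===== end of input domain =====

-- B replaces A's per-character scan-and-accumulate loop by slicing off the untouched
-- prefix/suffix and one str.replace on the in-range middle slice (idiomatic rewrite).

-- ===== PORT A =====
-- the while loop: i is the running index, one character (or ca2) appended per step
def changeCarLoop (ca1 ca2 : List Char) (debut fin : Int) : Int → List Char → List Char
  | _, [] => []
  | i, c :: t =>
      (if debut ≤ i ∧ i ≤ fin ∧ [c] = ca1 then ca2 else [c])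
        ++ changeCarLoop ca1 ca2 debut fin (i + 1) t

def changeCar (ch : String) (ca1 : String) (ca2 : String) (debut : Int) (fin : Int) : String :=
  let fin' : Int := if fin = -1 then (ch.toList.length : Int) else fin
  String.ofList (changeCarLoop ca1.toList ca2.toList debut fin' 0 ch.toList)

-- ===== PORT B =====
def changeCar_alt (ch : String) (ca1 : String) (ca2 : String) (debut : Int) (fin : Int) : String :=
  let hi : Int := if fin = -1 then (ch.toList.length : Int) - 1 else min fin ((ch.toList.length : Int) - 1)
  let lo : Int := max debut 0
  if ca1.toList.length ≠ 1 ∨ hi < lo then ch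
  else
    String.ofList (PySem.Chars.slice ch.toList none (some lo)
      ++ PySem.Chars.replace (PySem.Chars.slice ch.toList (some lo) (some (hi + 1))) ca1.toList ca2.toList
      ++ PySem.Chars.slice ch.toList (some (hi + 1)) none)

-- ===== PRECONDITION & SPEC =====
def Spec_changeCar (ch : String) (ca1 : String) (ca2 : String) (debut : Int) (fin : Int) (out : String) : Prop := out = changeCar_alt ch ca1 ca2 debut fin
instance (ch : String) (ca1 : String) (ca2 : String) (debut : Int) (fin : Int) (out : String) : Decidable (Spec_changeCar ch ca1 ca2 debut fin out) := by unfold Spec_changeCar; infer_instance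

-- ===== CLAIM (what is proved, stated in full; the proofs are below) =====
def Claim_equal_changeCar : Prop := ∀ (ch : String) (ca1 : String) (ca2 : String) (debut : Int) (fin : Int), Dom_changeCar ch ca1 ca2 debut fin → Spec_changeCar ch ca1 ca2 debut fin (changeCar ch ca1 ca2 debut fin)

-- ===== LEMMAS AND PROOFS =====

theorem changeCarLoop_append (ca1 ca2 : List Char) (d f : Int) (xs ys : List Char) (i : Int) :
    changeCarLoop ca1 ca2 d f i (xs ++ ys)
      = changeCarLoop ca1 ca2 d f i xs ++ changeCarLoop ca1 ca2 d f (i + xs.length) ys := by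
  induction xs generalizing i with
  | nil => simp [changeCarLoop]
  | cons x t ih => simp [changeCarLoop, ih (i + 1)]; ring_nf

-- outside the index window the loop copies its input unchanged
theorem changeCarLoop_id (ca1 ca2 : List Char) (d f : Int) (cs : List Char) (i : Int)
    (h : ∀ k : Nat, k < cs.length → ¬(d ≤ i + k ∧ i + k ≤ f)) :
    changeCarLoop ca1 ca2 d f i cs = cs := by
  induction cs generalizing i with
  | nil => simp [changeCarLoop]
  | cons x t ih =>
    have h0 := h 0 (by simp)
    simp at h0
    have : ¬(d ≤ i ∧ i ≤ f ∧ [x] = ca1) := by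
      rintro ⟨h1, h2, _⟩; have := h0 h1; omega
    simp [changeCarLoop, this]
    exact ih (i + 1) (fun k hk => by
      have := h (k + 1) (by simpa using Nat.succ_lt_succ hk)
      push_cast at this ⊢; omega)

-- a ca1 that is not one character never matches: the loop copies its input
theorem changeCarLoop_ne (ca1 ca2 : List Char) (d f : Int) (h : ca1.length ≠ 1)
    (cs : List Char) (i : Int) : changeCarLoop ca1 ca2 d f i cs = cs := by
  induction cs generalizing i with
  | nil => simp [changeCarLoop]
  | cons x t ih =>
    have : ¬([x] = ca1) := fun hc => h (by rw [← hc]; rfl)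
    simp [changeCarLoop, this, ih (i + 1)]

-- inside the index window the loop is a pure per-character substitution
theorem changeCarLoop_mid (ca1 ca2 : List Char) (d f : Int) (cs : List Char) (i : Int)
    (h : ∀ k : Nat, k < cs.length → d ≤ i + k ∧ i + k ≤ f) :
    changeCarLoop ca1 ca2 d f i cs
      = cs.flatMap (fun c => if [c] = ca1 then ca2 else [c]) := by
  induction cs generalizing i with
  | nil => simp [changeCarLoop]
  | cons x t ih =>
    have h0 := h 0 (by simp)
    simp at h0
    rw [changeCarLoop]
    rw [ih (i + 1) (fun k hk => by
      have := h (k + 1) (by simpa using Nat.succ_lt_succ hk)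
      push_cast at this ⊢; omega)]
    by_cases hx : [x] = ca1 <;> simp [hx, h0.1, h0.2]

-- str.replace with a single-character pattern is per-character substitution
theorem replaceGo_single (c : Char) (new : List Char) (fuel : Nat) (l acc : List Char)
    (h : l.length ≤ fuel) :
    PySem.Chars.replace.go [c] new fuel l acc
      = acc.reverse ++ l.flatMap (fun x => if x = c then new else [x]) := by
  induction fuel generalizing l acc with
  | zero =>
    cases l with
    | nil => simp [PySem.Chars.replace.go]
    | cons x t => simp at h
  | succ n ih =>
    cases l with
    | nil => simp [PySem.Chars.replace.go]
    | cons x t =>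
      rw [PySem.Chars.replace.go]
      by_cases hx : x = c
      · simp [hx, List.isPrefixOf, ih t _ (by simpa using h)]
      · simp [List.isPrefixOf, hx, ih t _ (by simpa using h)]
        exact fun hc => absurd hc.symm hx

theorem replace_single (s : List Char) (c : Char) (new : List Char) :
    PySem.Chars.replace s [c] new = s.flatMap (fun x => if x = c then new else [x]) := by
  rw [PySem.Chars.replace]
  simp [replaceGo_single c new s.length s [] le_rfl]

theorem changeCar_spec_aux (ch ca1 ca2 : String) (debut fin : Int) :
    changeCar ch ca1 ca2 debut fin = changeCar_alt ch ca1 ca2 debut fin := by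
  rw [changeCar, changeCar_alt]
  set cs := ch.toList with hcs
  set n : Int := (cs.length : Int) with hn
  set fin' : Int := if fin = -1 then n else fin with hfin'
  set hi : Int := if fin = -1 then n - 1 else min fin (n - 1) with hhi
  set lo : Int := max debut 0 with hlo
  by_cases hcond : ca1.toList.length ≠ 1 ∨ hi < lo
  · -- B returns ch unchanged; A's loop never rewrites a character
    rw [if_pos hcond]
    rcases hcond with hlen | hrange
    · rw [changeCarLoop_ne _ _ _ _ hlen]
      simp [hcs]
    · rw [changeCarLoop_id]
      · simp [hcs]
      · intro k hk
        have hkn : (k : Int) < n := by simp [hn]; exact_mod_cast hk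
        rintro ⟨h1, h2⟩
        rw [hfin'] at h2
        rw [hhi, hlo] at hrange
        split_ifs at h2 <;> split_ifs at hrange <;> omega
  · rw [if_neg hcond]
    push Not at hcond
    obtain ⟨hlen, hge⟩ := hcond
    obtain ⟨a, ha⟩ := List.length_eq_one_iff.mp hlen
    -- the window bounds as naturals
    have hlo0 : (0 : Int) ≤ lo := by rw [hlo]; omega
    have hhi1 : hi ≤ n - 1 := by rw [hhi]; split_ifs <;> omega
    have hhi0 : (0 : Int) ≤ hi + 1 := by omega
    set l : Nat := lo.toNat with hl
    set m : Nat := (hi + 1).toNat with hm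
    have hlm : l ≤ m := by omega
    have hmn : m ≤ cs.length := by
      have : hi + 1 ≤ n := by omega
      omega
    -- rewrite B's three slices
    rw [PySem.Chars.slice_eq_listSlice, PySem.Chars.slice_eq_listSlice,
        PySem.Chars.slice_eq_listSlice,
        PySem.List.slice_to cs hlo0, PySem.List.slice_toNat cs hlo0 hhi0,
        PySem.List.slice_from cs hhi0, ← hl, ← hm]
    -- decompose cs and split A's loop accordingly
    have hdecomp : cs = cs.take l ++ ((cs.drop l).take (m - l) ++ cs.drop m) := by
      have h1 : cs.drop m = (cs.drop l).drop (m - l) := by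
        rw [List.drop_drop]; congr 1; omega
      rw [h1, List.take_append_drop, List.take_append_drop]
    conv_lhs => rw [hdecomp]
    rw [changeCarLoop_append, changeCarLoop_append]
    have hlenpre : (cs.take l).length = l := by
      rw [List.length_take]; omega
    have hlenmid : ((cs.drop l).take (m - l)).length = m - l := by
      rw [List.length_take, List.length_drop]; omega
    rw [hlenpre, hlenmid]
    -- prefix: indices < lo are below the window
    rw [changeCarLoop_id _ _ _ _ _ 0 (by
      intro k hk
      rw [hlenpre] at hk
      rintro ⟨h1, _⟩
      rw [hlo] at hl
      omega)]
    -- suffix: indices ≥ hi + 1 are above the window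
    rw [changeCarLoop_id _ _ _ _ (cs.drop m) ((0 : Int) + l + (m - l : Nat)) (by
      intro k hk
      rw [List.length_drop] at hk
      rintro ⟨_, h2⟩
      rw [hfin'] at h2
      rw [hhi] at hm
      split_ifs at h2 <;> split_ifs at hm <;> omega)]
    -- middle: every index is inside the window, so the loop is the substitution
    rw [changeCarLoop_mid _ _ _ _ _ _ (by
      intro k hk
      rw [hlenmid] at hk
      rw [hfin']
      rw [hhi] at hm
      rw [hlo] at hl
      constructor <;> [skip; split_ifs] <;> split_ifs at hm <;> omega)]
    rw [ha, replace_single]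
    simp

-- ===== VERDICT (by name: the statement is the Claim_ definition above) =====
theorem changeCar_spec : Claim_equal_changeCar := by
  intro ch ca1 ca2 debut fin _
  unfold Spec_changeCar
  exact changeCar_spec_aux ch ca1 ca2 debut fin
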